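-- pv_equiv track=rewrite | github.com/dreykdrk7/EuroMillionsAnalytics | ConsultarApuestaCombinada.py | generar_combinaciones_apuesta
-- ===== SOURCE A (Python) =====
-- import itertools
-- from itertools import combinations
--
-- def generar_combinaciones_apuesta(numeros, estrellas):
--     """Genera todas las combinaciones válidas para una apuesta de Euromillones."""
--     combinaciones_numeros = list(combinations(numeros, 5))
--     combinaciones_estrellas = list(combinations(estrellas, 2))
--
--     # Producto cartesiano para generar todas las combinaciones de números y estrellas
--     todas_combinaciones = list(itertools.product(combinaciones_numeros, combinaciones_estrellas))
--
--     # Formatear las combinaciones para que coincidan con el formato de entrada esperado por contar_aciertos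
--     combinaciones_formateadas = [
--         (' - '.join(map(lambda x: f"{x:02d}", combo_num)) + " - " + ' - '.join(map(lambda x: f"{x:02d}", combo_est)))
--         for combo_num, combo_est in todas_combinaciones
--     ]
--
--     return combinaciones_formateadas
-- ===== SOURCE B (Python) =====
-- def generar_combinaciones_apuesta(numeros, estrellas):
--     """B: build the formatted number-part and star-part string tables directly by
--     recursion (never materializing combination tuples), then join the two tables
--     with a double loop."""
--     def fmt(x):
--         return format(x, '02d')
--
--     def comb_strings(items, k):
--         # all ' - '-joined formatted strings of k-combinations of items (k >= 1)
--         if k == 1: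
--             return [fmt(x) for x in items]
--         out = []
--         for i in range(len(items) - k + 1):
--             head = fmt(items[i])
--             for tail in comb_strings(items[i + 1:], k - 1):
--                 out.append(head + ' - ' + tail)
--         return out
--
--     num_parts = comb_strings(list(numeros), 5)
--     star_parts = comb_strings(list(estrellas), 2)
--     result = []
--     for np in num_parts:
--         for sp in star_parts:
--             result.append(np + ' - ' + sp)
--     return result
-- ===== Notes on version B (the rewrite author's own statement) =====
-- stated objective: alternative
-- what changed: B never builds combination tuples or their cartesian product: it recursively builds the formatted number-part strings and star-part strings as two tables and concatenates them pairwise in a second pass, instead of formatting each full product tuple.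
import Mathlib
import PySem

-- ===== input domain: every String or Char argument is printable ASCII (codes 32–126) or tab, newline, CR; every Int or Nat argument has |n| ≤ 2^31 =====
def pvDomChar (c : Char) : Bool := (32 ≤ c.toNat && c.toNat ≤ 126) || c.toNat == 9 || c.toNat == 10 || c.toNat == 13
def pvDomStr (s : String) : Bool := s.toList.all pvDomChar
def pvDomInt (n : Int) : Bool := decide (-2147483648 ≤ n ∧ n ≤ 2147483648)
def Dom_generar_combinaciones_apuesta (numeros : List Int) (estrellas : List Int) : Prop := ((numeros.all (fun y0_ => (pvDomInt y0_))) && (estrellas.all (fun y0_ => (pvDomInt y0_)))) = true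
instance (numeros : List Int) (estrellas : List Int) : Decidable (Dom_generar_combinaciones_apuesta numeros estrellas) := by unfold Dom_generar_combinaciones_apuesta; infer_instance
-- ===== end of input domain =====

-- B builds the two formatted-substring tables directly by recursion (no combination
-- tuples, no product list) and concatenates them pairwise; same cost, different shape.

-- f"{x:02d}": zero-pad to width 2 (only single digits 0..9 get a pad; exact for all ints)
def fmtInt (x : Int) : String := if 0 ≤ x ∧ x < 10 then "0" ++ PySem.Int.toStr x else PySem.Int.toStr x

-- ===== PORT A =====
-- itertools.combinations(xs, k) in the order itertools yields them (as lists)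
def pvCombs : Nat → List Int → List (List Int)
  | 0, _ => [[]]
  | _+1, [] => []
  | k+1, x :: xs => (pvCombs k xs).map (fun l => x :: l) ++ pvCombs (k+1) xs

-- ' - '.join, hand-ported (exact: str.join with this separator)
def pvJoinSep : List String → String
  | [] => ""
  | [s] => s
  | s :: rest => s ++ " - " ++ pvJoinSep rest

def generar_combinaciones_apuesta (numeros : List Int) (estrellas : List Int) : List String :=
  let combinaciones_numeros := pvCombs 5 numeros
  let combinaciones_estrellas := pvCombs 2 estrellas
  let todas_combinaciones := combinaciones_numeros.flatMap
    (fun cn => combinaciones_estrellas.map (fun ce => (cn, ce)))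
  todas_combinaciones.map
    (fun p => pvJoinSep (p.1.map fmtInt) ++ " - " ++ pvJoinSep (p.2.map fmtInt))

-- ===== PORT B =====
-- comb_strings(items, k): formatted ' - '-joined strings of all k-combinations, k ≥ 1
def pvCombStrings : Nat → List Int → List String
  | 0, _ => []          -- never called with k = 0 (B only uses k = 5 and k = 2)
  | 1, xs => xs.map fmtInt
  | _+2, [] => []
  | k+2, x :: xs =>
      (pvCombStrings (k+1) xs).map (fun tail => fmtInt x ++ " - " ++ tail)
        ++ pvCombStrings (k+2) xs

def generar_combinaciones_apuesta_alt (numeros : List Int) (estrellas : List Int) : List String :=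
  let num_parts := pvCombStrings 5 numeros
  let star_parts := pvCombStrings 2 estrellas
  num_parts.flatMap (fun np => star_parts.map (fun sp => np ++ " - " ++ sp))

-- ===== PRECONDITION & SPEC =====
def Spec_generar_combinaciones_apuesta (numeros : List Int) (estrellas : List Int) (out : List String) : Prop := out = generar_combinaciones_apuesta_alt numeros estrellas
instance (numeros : List Int) (estrellas : List Int) (out : List String) : Decidable (Spec_generar_combinaciones_apuesta numeros estrellas out) := by unfold Spec_generar_combinaciones_apuesta; infer_instance

-- ===== CLAIM (what is proved, stated in full; the proofs are below) =====
def Claim_equal_generar_combinaciones_apuesta : Prop := ∀ (numeros : List Int) (estrellas : List Int), Dom_generar_combinaciones_apuesta numeros estrellas → Spec_generar_combinaciones_apuesta numeros estrellas (generar_combinaciones_apuesta numeros estrellas)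

-- ===== LEMMAS AND PROOFS =====

-- 1-combinations are the singletons, in order
theorem pvCombs_one (xs : List Int) : pvCombs 1 xs = xs.map (fun a => [a]) := by
  induction xs with
  | nil => simp [pvCombs]
  | cons x xs ih => simp [pvCombs, ih]

-- every member of pvCombs k xs has length k
theorem pvCombs_length : ∀ (k : Nat) (xs : List Int), ∀ l ∈ pvCombs k xs, l.length = k := by
  intro k xs
  induction xs generalizing k with
  | nil => cases k <;> simp [pvCombs]
  | cons x xs ih =>
    cases k with
    | zero => simp [pvCombs]
    | succ k =>
      intro l hl
      simp only [pvCombs, List.mem_append, List.mem_map] at hl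
      rcases hl with ⟨l', hl', rfl⟩ | hl
      · simp [ih k l' hl']
      · exact ih (k+1) l hl

-- the substring table B builds is A's combination list, formatted and joined
theorem pvCombStrings_eq : ∀ (k : Nat) (xs : List Int),
    pvCombStrings (k+1) xs = (pvCombs (k+1) xs).map (fun l => pvJoinSep (l.map fmtInt)) := by
  intro k xs
  induction xs generalizing k with
  | nil => cases k <;> simp [pvCombStrings, pvCombs]
  | cons x xs ih =>
    cases k with
    | zero =>
      simp [pvCombStrings, pvCombs_one, List.map_map, pvJoinSep]
    | succ k =>
      simp only [pvCombStrings, pvCombs, List.map_append, List.map_map, ih k, ih (k+1)]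
      congr 1
      apply List.map_congr_left
      intro l hl
      have hlen := pvCombs_length (k+1) xs l hl
      cases l with
      | nil => simp at hlen
      | cons a l => simp [pvJoinSep]

-- ===== VERDICT (by name: the statement is the Claim_ definition above) =====
theorem generar_combinaciones_apuesta_spec : Claim_equal_generar_combinaciones_apuesta := by
  intro numeros estrellas _
  show generar_combinaciones_apuesta numeros estrellas = generar_combinaciones_apuesta_alt numeros estrellas
  simp only [generar_combinaciones_apuesta, generar_combinaciones_apuesta_alt,
    pvCombStrings_eq, List.map_flatMap, List.map_map, List.flatMap_map]
  simp only [Function.comp_def]
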